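-- pv_equiv track=rewrite | github.com/fangru-lin/open_domain_parser | eval.py | generate_gold_ann_ctb
-- ===== SOURCE A (Python) =====
-- def generate_gold_ann_ctb(sent):
--     '''
--     Generate gold annotation for ctb data
--         Parameters:
--             sent (dict): a dictionary containing parsing tags for tokens in a sentence
--
--         Returns:
--             tokens (list): a list of tokens in segmented sentence
--             gold_sent (str): a string of gold parsed sentence
--     '''
--     temp = sent.split()
--     tokens = []
--     curr_gold = []
--     flag = False
--     for j in temp:
--         if flag:
--             flag = False
--             curr_gold[-1] = curr_gold[-1]+')'*(len(j.split(')'))-3)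
--             continue
--
--         # Remove the nonce tags for ellipsis
--         if j == '(-NONE-':
--             curr_gold.pop()
--             flag = True
--             continue
--         if j[-1] == ')':
--             curr_gold.append(j)
--             tokens.append(j[0]+j[1:].replace(')', ''))
--         else:
--             curr_gold.append(j.split('-')[0])
--     gold_sent = ' '.join(curr_gold)
--
--     return tokens, gold_sent
-- ===== SOURCE B (Python) =====
-- def generate_gold_ann_ctb(sent):
--     '''
--     Generate gold annotation for ctb data: a three-stage pipeline instead of
--     A's fused flag state machine.  Stage 1 classifies every token with a role
--     ('none' for the nonce tag, 'eaten' for the token right after it, 'word'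
--     for bracket-closing tokens, 'head' otherwise); stage 2 derives the token
--     list purely by a comprehension over the word-role entries; stage 3 folds
--     the role stream into the gold list as edit operations.
--     '''
--     temp = sent.split()
--     # Stage 1: classify tokens
--     roles = []
--     for j in temp:
--         if roles and roles[-1] == 'none':
--             roles.append('eaten')
--         elif j == '(-NONE-':
--             roles.append('none')
--         elif j.endswith(')'):
--             roles.append('word')
--         else:
--             roles.append('head')
--     # Stage 2: tokens come from word-role entries only
--     tokens = [j[0] + j[1:].replace(')', '') for j, r in zip(temp, roles) if r == 'word']
--     # Stage 3: gold list as a fold of edit operations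
--     gold = []
--     for j, r in zip(temp, roles):
--         if r == 'word':
--             gold.append(j)
--         elif r == 'head':
--             gold.append(j.split('-')[0])
--         elif r == 'none':
--             gold.pop()
--         else:  # eaten: close the brackets of the elided constituent
--             gold[-1] += ')' * (len(j.split(')')) - 3)
--     return tokens, ' '.join(gold)
-- ===== Notes on version B (the rewrite author's own statement) =====
-- stated objective: alternative
-- what changed: Replaced A's fused single-pass flag state machine by a three-stage pipeline: a classification pass assigning each token a role, a comprehension deriving the token list from the word-role entries alone, and a separate fold applying the role stream as edit operations on the gold list.
import Mathlib
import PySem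

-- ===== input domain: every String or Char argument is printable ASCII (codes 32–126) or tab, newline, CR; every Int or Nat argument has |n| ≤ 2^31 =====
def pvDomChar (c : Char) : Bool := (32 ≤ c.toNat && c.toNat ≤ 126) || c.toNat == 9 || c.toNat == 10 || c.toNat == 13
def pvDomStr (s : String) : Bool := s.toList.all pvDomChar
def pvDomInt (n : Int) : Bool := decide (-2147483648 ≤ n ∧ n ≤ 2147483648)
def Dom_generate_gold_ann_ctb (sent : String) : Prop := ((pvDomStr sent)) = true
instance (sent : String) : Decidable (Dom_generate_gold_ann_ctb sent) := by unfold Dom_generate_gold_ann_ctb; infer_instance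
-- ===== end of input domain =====

-- B replaces A's fused flag state machine by a three-stage pipeline (classify
-- roles, derive tokens by a comprehension, fold the gold edits); objective: alternative.

-- ===== PORT A =====
def ctbNoneTag : List Char := ['(', '-', 'N', 'O', 'N', 'E', '-']

-- j[0] + j[1:].replace(')', '')   (Python raises on j = ''; split() never yields it)
def ctbWordTok (j : List Char) : List Char :=
  match j with
  | [] => []
  | c :: rest => c :: PySem.Chars.replace rest [')'] []

-- j.split('-')[0]
def ctbHead (j : List Char) : List Char := (PySem.Chars.splitOn j ['-']).headD []

-- curr_gold[-1] = curr_gold[-1] + ')'*(len(j.split(')'))-3)  (Python raises on empty curr_gold; excluded by Pre_)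
def ctbClose (curr : List (List Char)) (j : List Char) : List (List Char) :=
  match curr with
  | [] => []
  | _ => curr.dropLast ++ [curr.getLastD [] ++ List.replicate ((PySem.Chars.splitOn j [')']).length - 3) ')']

-- A's for-loop: state (tokens, curr_gold, flag), one token per step
def ctbLoopA : List (List Char) → List (List Char) → List (List Char) → Bool →
    List (List Char) × List (List Char)
  | [], tokens, curr, _ => (tokens, curr)
  | j :: rest, tokens, curr, flag =>
    if flag then
      ctbLoopA rest tokens (ctbClose curr j) false
    else if j = ctbNoneTag then
      ctbLoopA rest tokens curr.dropLast true
    else if PySem.List.pyGet? j (-1) = some ')' then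
      ctbLoopA rest (tokens ++ [ctbWordTok j]) (curr ++ [j]) false
    else
      ctbLoopA rest tokens (curr ++ [ctbHead j]) false

def generate_gold_ann_ctb (sent : String) : List String × String :=
  let temp := PySem.Chars.split₀ sent.toList
  let res := ctbLoopA temp [] [] false
  (res.1.map String.ofList, String.ofList (PySem.Chars.join [' '] res.2))

-- ===== PORT B =====
-- Stage 1 of Source B: classify each token (0 = 'none', 1 = 'eaten', 2 = 'word', 3 = 'head');
-- 'roles and roles[-1] == "none"' is the getLast? test on the accumulated role list.
def ctbRoles (temp : List (List Char)) : List Nat :=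
  temp.foldl (fun rs j =>
    if rs.getLast? = some 0 then rs ++ [1]
    else if j = ctbNoneTag then rs ++ [0]
    else if PySem.Chars.endswith j [')'] then rs ++ [2]
    else rs ++ [3]) []

-- Stage 3 of Source B: one gold edit per (token, role) pair
def ctbGoldStep (g : List (List Char)) (p : List Char × Nat) : List (List Char) :=
  if p.2 = 2 then g ++ [p.1]
  else if p.2 = 3 then g ++ [ctbHead p.1]
  else if p.2 = 0 then g.dropLast
  else ctbClose g p.1

def generate_gold_ann_ctb_alt (sent : String) : List String × String :=
  let temp := PySem.Chars.split₀ sent.toList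
  let roles := ctbRoles temp
  -- Stage 2: tokens by comprehension over the word-role entries
  let tokens := (temp.zip roles).filterMap
    (fun p => if p.2 = 2 then some (ctbWordTok p.1) else none)
  let gold := (temp.zip roles).foldl ctbGoldStep []
  (tokens.map String.ofList, String.ofList (PySem.Chars.join [' '] gold))

-- ===== PRECONDITION & SPEC =====
-- ctbOk temp d: d is the number of pending gold entries; a '(-NONE-' token needs
-- one entry to pop, and one more to extend when a token follows it.
def ctbOk : List (List Char) → Nat → Bool
  | [], _ => true
  | j :: rest, d =>
    if j = ctbNoneTag then
      match rest with
      | [] => decide (1 ≤ d)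
      | _ :: rest' => decide (2 ≤ d) && ctbOk rest' (d - 1)
    else ctbOk rest (d + 1)

-- Pre_ excludes exactly the inputs on which Python A raises IndexError: a
-- '(-NONE-' token reached with no gold entry to pop, or with no entry left to
-- extend while a further token follows.
def Pre_generate_gold_ann_ctb (sent : String) : Prop :=
  ctbOk (PySem.Chars.split₀ sent.toList) 0 = true
instance (sent : String) : Decidable (Pre_generate_gold_ann_ctb sent) := by
  unfold Pre_generate_gold_ann_ctb; infer_instance

def pvWitness_generate_gold_ann_ctb : String := "x"

def Spec_generate_gold_ann_ctb (sent : String) (out : List String × String) : Prop := out = generate_gold_ann_ctb_alt sent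
instance (sent : String) (out : List String × String) : Decidable (Spec_generate_gold_ann_ctb sent out) := by unfold Spec_generate_gold_ann_ctb; infer_instance

-- ===== CLAIM (what is proved, stated in full; the proofs are below) =====
def Claim_equal_generate_gold_ann_ctb : Prop := ∀ (sent : String), Dom_generate_gold_ann_ctb sent → Pre_generate_gold_ann_ctb sent → Spec_generate_gold_ann_ctb sent (generate_gold_ann_ctb sent)

-- ===== LEMMAS AND PROOFS =====
-- recursive rendering of B's role classification, flag = "previous role was 'none'"
def ctbRolesGo : Bool → List (List Char) → List Nat
  | _, [] => []
  | true, _ :: rest => 1 :: ctbRolesGo false rest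
  | false, j :: rest =>
    if j = ctbNoneTag then 0 :: ctbRolesGo true rest
    else if PySem.Chars.endswith j [')'] then 2 :: ctbRolesGo false rest
    else 3 :: ctbRolesGo false rest

theorem ctbRoles_foldl_eq : ∀ (temp : List (List Char)) (rs : List Nat),
    temp.foldl (fun rs j =>
      if rs.getLast? = some 0 then rs ++ [1]
      else if j = ctbNoneTag then rs ++ [0]
      else if PySem.Chars.endswith j [')'] then rs ++ [2]
      else rs ++ [3]) rs
    = rs ++ ctbRolesGo (rs.getLast? = some 0) temp
  | [], rs => by simp [ctbRolesGo]
  | j :: rest, rs => by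
    by_cases h0 : rs.getLast? = some 0
    · have ih := ctbRoles_foldl_eq rest (rs ++ [1])
      simp [List.foldl_cons, h0, ih, ctbRolesGo]
    · by_cases hN : j = ctbNoneTag
      · have ih := ctbRoles_foldl_eq rest (rs ++ [0])
        simp [List.foldl_cons, h0, hN, ih, ctbRolesGo]
      · by_cases hP : PySem.Chars.endswith j [')'] = true
        · have ih := ctbRoles_foldl_eq rest (rs ++ [2])
          simp [List.foldl_cons, h0, hN, hP, ih, ctbRolesGo]
        · have ih := ctbRoles_foldl_eq rest (rs ++ [3])
          simp [List.foldl_cons, h0, hN, hP, ih, ctbRolesGo]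

theorem ctbRoles_eq_go (temp : List (List Char)) : ctbRoles temp = ctbRolesGo false temp := by
  have := ctbRoles_foldl_eq temp []
  simpa [ctbRoles] using this

-- B's j.endswith(')') is A's j[-1] == ')' test
theorem ctb_endswith_iff (j : List Char) :
    PySem.Chars.endswith j [')'] = true ↔ PySem.List.pyGet? j (-1) = some ')' := by
  rw [PySem.Chars.endswith_iff, PySem.List.pyGet?_neg_one]
  constructor
  · rintro ⟨pre, rfl⟩; simp
  · intro h
    rcases List.getLast?_eq_some_iff.mp h with ⟨pre, rfl⟩
    exact ⟨pre, rfl⟩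

-- the flag machine computes exactly the role-stream pipeline
theorem ctbLoopA_eq_pipeline : ∀ (temp tokens curr : List (List Char)) (flag : Bool),
    ctbLoopA temp tokens curr flag =
      (tokens ++ (temp.zip (ctbRolesGo flag temp)).filterMap
          (fun p => if p.2 = 2 then some (ctbWordTok p.1) else none),
       (temp.zip (ctbRolesGo flag temp)).foldl ctbGoldStep curr)
  | [], tokens, curr, flag => by simp [ctbLoopA, ctbRolesGo]
  | j :: rest, tokens, curr, true => by
    have ih := ctbLoopA_eq_pipeline rest tokens (ctbClose curr j) false
    simp [ctbLoopA, ctbRolesGo, ih, ctbGoldStep]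
  | j :: rest, tokens, curr, false => by
    by_cases hN : j = ctbNoneTag
    · have ih := ctbLoopA_eq_pipeline rest tokens curr.dropLast true
      simp [ctbLoopA, ctbRolesGo, hN, ih, ctbGoldStep]
    · by_cases hP : PySem.List.pyGet? j (-1) = some ')'
      · have hE : PySem.Chars.endswith j [')'] = true := (ctb_endswith_iff j).mpr hP
        have ih := ctbLoopA_eq_pipeline rest (tokens ++ [ctbWordTok j]) (curr ++ [j]) false
        simp [ctbLoopA, ctbRolesGo, hN, hP, hE, ih, ctbGoldStep]
      · have hE : ¬ PySem.Chars.endswith j [')'] = true := fun h => hP ((ctb_endswith_iff j).mp h)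
        have ih := ctbLoopA_eq_pipeline rest tokens (curr ++ [ctbHead j]) false
        simp [ctbLoopA, ctbRolesGo, hN, hP, hE, ih, ctbGoldStep]

-- ===== VERDICT (by name: the statement is the Claim_ definition above) =====
theorem generate_gold_ann_ctb_spec : Claim_equal_generate_gold_ann_ctb := by
  intro sent _ _
  simp only [Spec_generate_gold_ann_ctb, generate_gold_ann_ctb, generate_gold_ann_ctb_alt,
    ctbRoles_eq_go, ctbLoopA_eq_pipeline, List.nil_append]
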